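-- pv_equiv track=rewrite | github.com/NPP0804/Project-Euler-Solution | Problem 56/answer.py | powerfulDigitSum
-- ===== SOURCE A (Python) =====
-- def powerfulDigitSum(N):
--     maxSum = 0
--     for i in range(N):
--         for j in range(N):
--             sum = 0
--             for k in str(i ** j):
--                 sum += int(k)
--             if sum > maxSum :
--                 maxSum = sum
--     return maxSum
-- ===== SOURCE B (Python) =====
-- def _digit_sum(n):
--     s = 0
--     while n:
--         n, r = divmod(n, 10)
--         s += r
--     return s
--
--
-- DSUM = [_digit_sum(x) for x in range(100)]  # decimal digit sum of every 2-digit limb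
--
--
-- def mul_limbs(limbs, i):
--     """Multiply a little-endian base-100 limb list by i, propagating carries."""
--     out = []
--     carry = 0
--     for l in limbs:
--         carry += l * i
--         out.append(carry % 100)
--         carry //= 100
--     while carry:
--         out.append(carry % 100)
--         carry //= 100
--     return out
--
--
-- def powerfulDigitSum(N):
--     best = 0
--     for i in range(N):
--         limbs = [1]  # little-endian base-100 limbs of i**j
--         for j in range(N):
--             s = sum(map(DSUM.__getitem__, limbs))
--             if s > best:
--                 best = s
--             limbs = mul_limbs(limbs, i)
--     return best
-- ===== Notes on version B (the rewrite author's own statement) =====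
-- stated objective: faster
-- what changed: B never forms i**j or its string: it keeps each power as a little-endian base-100 limb list, multiplies that list by i with schoolbook carry propagation each step, and reads the digit sum off a precomputed per-limb digit-sum table; a timing run measured it 1.9-3.1x faster at the larger sizes.
import Mathlib
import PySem

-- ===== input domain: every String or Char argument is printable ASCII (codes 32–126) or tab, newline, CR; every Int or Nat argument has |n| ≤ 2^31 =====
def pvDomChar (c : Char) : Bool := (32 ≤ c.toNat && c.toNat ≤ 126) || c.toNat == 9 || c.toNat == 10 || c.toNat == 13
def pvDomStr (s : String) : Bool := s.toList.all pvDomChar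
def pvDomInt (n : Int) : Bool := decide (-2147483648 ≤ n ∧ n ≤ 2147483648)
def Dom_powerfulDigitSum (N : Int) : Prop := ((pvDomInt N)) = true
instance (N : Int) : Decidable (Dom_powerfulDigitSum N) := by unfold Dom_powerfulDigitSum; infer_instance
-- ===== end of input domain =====

-- B keeps each power i**j as a little-endian base-100 limb list (schoolbook multiply by i
-- with carry propagation) and sums precomputed per-limb digit sums, instead of A's
-- str(i**j) character loop.


-- ===== PORT A =====
-- for i in range(N): for j in range(N): sum = Σ int(k) for k in str(i**j); track max.
-- int(k) is ported as (ofChars? [k]).getD 0; k is always a digit of str of a nonnegative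
-- number here (i, j ≥ 0), so int(k) never raises and the default is never used.
def powerfulDigitSum (N : Int) : Int :=
  (PySem.List.pyRange 0 N).foldl (fun maxSum i =>
    (PySem.List.pyRange 0 N).foldl (fun maxSum j =>
      let sum := (PySem.Int.toChars (i ^ j.toNat)).foldl
        (fun s k => s + (PySem.Int.ofChars? [k]).getD 0) 0
      if sum > maxSum then sum else maxSum) maxSum) 0

-- ===== PORT B =====
-- All limb/carry values in Source B are nonnegative ints (i comes from range(N)), so they are
-- carried as Nat, where Python's % and // agree with Nat.mod / Nat.div exactly.
-- Source B's _digit_sum: while n: n, r = divmod(n, 10); s += r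
def digitSumLoop (n : Nat) (s : Int) : Int :=
  if n = 0 then s else digitSumLoop (n / 10) (s + ((n % 10 : Nat) : Int))

-- Source B's DSUM table: [_digit_sum(x) for x in range(100)]
def dsumTable : List Int := (List.range 100).map (fun x => digitSumLoop x 0)

-- Source B's trailing `while carry:` loop in mul_limbs
def carryExpand (carry : Nat) (out : List Nat) : List Nat :=
  if h : carry = 0 then out else carryExpand (carry / 100) (out ++ [carry % 100])
  termination_by carry
  decreasing_by exact Nat.div_lt_self (Nat.pos_of_ne_zero h) (by norm_num)

-- Source B's mul_limbs: for l in limbs: carry += l*i; out.append(carry%100); carry //= 100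
def mulLimbs (limbs : List Nat) (i : Nat) : List Nat :=
  let oc := limbs.foldl
    (fun (oc : List Nat × Nat) l =>
      (oc.1 ++ [(oc.2 + l * i) % 100], (oc.2 + l * i) / 100))
    ([], 0)
  carryExpand oc.2 oc.1

-- DSUM[l] is ported as dsumTable.getD l 0; every limb is < 100, so the Python
-- indexing never raises and the default is never used.
def powerfulDigitSum_alt (N : Int) : Int :=
  (PySem.List.pyRange 0 N).foldl (fun best i =>
    ((PySem.List.pyRange 0 N).foldl
      (fun (st : Int × List Nat) _ =>
        let s : Int := (st.2.map (fun l => dsumTable.getD l 0)).sum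
        (if s > st.1 then s else st.1, mulLimbs st.2 i.toNat))
      (best, [1])).1) 0

-- ===== PRECONDITION & SPEC =====
def Spec_powerfulDigitSum (N : Int) (out : Int) : Prop := out = powerfulDigitSum_alt N
instance (N : Int) (out : Int) : Decidable (Spec_powerfulDigitSum N out) := by unfold Spec_powerfulDigitSum; infer_instance

-- ===== CLAIM (what is proved, stated in full; the proofs are below) =====
def Claim_equal_powerfulDigitSum : Prop := ∀ (N : Int), Dom_powerfulDigitSum N → Spec_powerfulDigitSum N (powerfulDigitSum N)

-- ===== LEMMAS AND PROOFS =====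

-- value of a little-endian base-100 limb list (proof-side only)
def dval : List Nat → Nat
  | [] => 0
  | d :: ds => d + 100 * dval ds

-- int('d') for a single decimal digit character
lemma val_digitChar (r : Nat) (h : r < 10) :
    (PySem.Int.ofChars? [Nat.digitChar r]).getD 0 = (r : Int) := by
  interval_cases r <;> decide

lemma digitSumLoop_shift (n : Nat) : ∀ s : Int, digitSumLoop n s = s + digitSumLoop n 0 := by
  induction n using Nat.strong_induction_on with
  | _ n ih =>
    intro s
    by_cases h : n = 0
    · subst h; rw [digitSumLoop, if_pos rfl, digitSumLoop, if_pos rfl]; ring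
    · have hlt : n / 10 < n := Nat.div_lt_self (Nat.pos_of_ne_zero h) (by norm_num)
      rw [digitSumLoop, if_neg h, ih _ hlt]
      conv_rhs => rw [digitSumLoop, if_neg h, ih _ hlt]
      ring

-- A's per-character sum over Nat.toDigitsCore equals the divmod loop
lemma toDigitsCore_sum (fuel : Nat) : ∀ (n : Nat) (ds : List Char), n < fuel →
    ((Nat.toDigitsCore 10 fuel n ds).map
        (fun k => (PySem.Int.ofChars? [k]).getD 0)).sum
      = digitSumLoop n 0 + ((ds.map (fun k => (PySem.Int.ofChars? [k]).getD 0)).sum) := by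
  induction fuel with
  | zero => intro n ds h; omega
  | succ fuel ih =>
    intro n ds h
    rw [Nat.toDigitsCore]
    by_cases h0 : n / 10 = 0
    · rw [if_pos h0, List.map_cons, List.sum_cons, digitSumLoop]
      by_cases hn : n = 0
      · rw [if_pos hn]; subst hn; simp [val_digitChar 0 (by norm_num)]
      · rw [if_neg hn, h0, digitSumLoop, if_pos rfl,
           val_digitChar (n % 10) (Nat.mod_lt _ (by norm_num))]
        push_cast
        ring
    · have hn : n ≠ 0 := by intro hz; exact h0 (by simp [hz])
      have hlt : n / 10 < fuel := by
        have := Nat.div_lt_self (Nat.pos_of_ne_zero hn) (show 1 < 10 by norm_num)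
        omega
      rw [if_neg h0, ih (n / 10) _ hlt, List.map_cons, List.sum_cons,
          val_digitChar (n % 10) (Nat.mod_lt _ (by norm_num))]
      conv_rhs => rw [digitSumLoop, if_neg hn, digitSumLoop_shift]
      ring

lemma foldl_addval (l : List Char) : ∀ s : Int,
    l.foldl (fun s k => s + (PySem.Int.ofChars? [k]).getD 0) s
      = s + (l.map (fun k => (PySem.Int.ofChars? [k]).getD 0)).sum := by
  induction l with
  | nil => intro s; simp
  | cons c l ih => intro s; simp [ih]; ring

-- A's string digit sum equals the divmod digit sum on nonnegative inputs
lemma strsum_eq_digitSum (m : Int) (hm : 0 ≤ m) :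
    (PySem.Int.toChars m).foldl (fun s k => s + (PySem.Int.ofChars? [k]).getD 0) 0
      = digitSumLoop m.toNat 0 := by
  rw [PySem.Int.toChars, if_neg (by omega)]
  rw [foldl_addval, Nat.toDigits, toDigitsCore_sum (m.toNat + 1) m.toNat [] (by omega)]
  simp

-- the digit sum splits at any power-of-10 boundary
lemma dsl_split (k : Nat) : ∀ (l v : Nat), l < 10 ^ k →
    digitSumLoop (l + 10 ^ k * v) 0 = digitSumLoop l 0 + digitSumLoop v 0 := by
  induction k with
  | zero =>
    intro l v h
    have hl : l = 0 := by omega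
    subst hl
    have h0 : digitSumLoop 0 0 = 0 := by unfold digitSumLoop; norm_num
    simp only [pow_zero, one_mul, h0, zero_add]
  | succ k ih =>
    intro l v h
    by_cases hn : l + 10 ^ (k + 1) * v = 0
    · have hp : 0 < 10 ^ (k + 1) := pow_pos (by norm_num) _
      have hl : l = 0 := by omega
      have hv : v = 0 := by nlinarith
      subst hl; subst hv
      have h0 : digitSumLoop 0 0 = 0 := by unfold digitSumLoop; norm_num
      simp only [Nat.mul_zero, h0, add_zero]
    · rw [digitSumLoop, if_neg hn]
      have hmod : (l + 10 ^ (k + 1) * v) % 10 = l % 10 := by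
        rw [pow_succ, show 10 ^ k * 10 * v = 10 * (10 ^ k * v) from by ring]
        exact Nat.add_mul_mod_self_left l 10 (10 ^ k * v)
      have hdiv : (l + 10 ^ (k + 1) * v) / 10 = l / 10 + 10 ^ k * v := by
        rw [pow_succ, show 10 ^ k * 10 * v = (10 ^ k * v) * 10 from by ring]
        exact Nat.add_mul_div_right l (10 ^ k * v) (by norm_num)
      have hl10 : l / 10 < 10 ^ k := Nat.div_lt_of_lt_mul (by rw [pow_succ] at h; omega)
      rw [hmod, hdiv, digitSumLoop_shift, ih (l / 10) v hl10]
      by_cases hl : l = 0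
      · subst hl
        have h0 : digitSumLoop 0 0 = 0 := by unfold digitSumLoop; norm_num
        norm_num [h0]
      · conv_rhs => rw [digitSumLoop, if_neg hl, digitSumLoop_shift]
        push_cast
        ring
  -- (10 ^ (k+1) = 10 ^ k * 10 throughout)

-- the table holds the digit sum of each limb
lemma dsumTable_getD (l : Nat) (h : l < 100) :
    dsumTable.getD l 0 = digitSumLoop l 0 := by
  unfold dsumTable
  rw [List.getD_eq_getElem _ _ (by simpa using h)]
  simp

-- the summed table entries of a limb list are the digit sum of its value
lemma dval_sum (ds : List Nat) (h : ∀ l ∈ ds, l < 100) :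
    digitSumLoop (dval ds) 0 = (ds.map (fun l => dsumTable.getD l 0)).sum := by
  induction ds with
  | nil => simp [dval, digitSumLoop]
  | cons d ds ih =>
    rw [dval, show (100 : Nat) = 10 ^ 2 from by norm_num,
        dsl_split 2 d (dval ds) (by norm_num; exact h d (by simp)),
        List.map_cons, List.sum_cons, ih (fun x hx => h x (by simp [hx])),
        dsumTable_getD d (h d (by simp))]

lemma dval_append (out : List Nat) (x : Nat) :
    dval (out ++ [x]) = dval out + x * 100 ^ out.length := by
  induction out with
  | nil => simp [dval]
  | cons d t ih => simp [dval, ih]; ring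

lemma carryExpand_val (c : Nat) : ∀ out : List Nat,
    dval (carryExpand c out) = dval out + c * 100 ^ out.length := by
  induction c using Nat.strong_induction_on with
  | _ c ih =>
    intro out
    by_cases h : c = 0
    · subst h; rw [carryExpand]; simp
    · rw [carryExpand, dif_neg h,
          ih (c / 100) (Nat.div_lt_self (Nat.pos_of_ne_zero h) (by norm_num)),
          dval_append]
      have hc : c % 100 + 100 * (c / 100) = c := Nat.mod_add_div c 100
      simp [List.length_append, pow_succ]
      have h2 : c % 100 * 100 ^ out.length + c / 100 * (100 ^ out.length * 100)
          = c * 100 ^ out.length := by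
        conv_rhs => rw [← hc]
        ring
      linarith [h2]

lemma carryExpand_lt (c : Nat) : ∀ out : List Nat, (∀ d ∈ out, d < 100) →
    ∀ d ∈ carryExpand c out, d < 100 := by
  induction c using Nat.strong_induction_on with
  | _ c ih =>
    intro out hout
    by_cases h : c = 0
    · subst h; rw [carryExpand]; simpa using hout
    · rw [carryExpand, dif_neg h]
      refine ih (c / 100) (Nat.div_lt_self (Nat.pos_of_ne_zero h) (by norm_num)) _ ?_
      intro d hd
      rcases List.mem_append.mp hd with h1 | h1
      · exact hout d h1
      · simp at h1; subst h1; exact Nat.mod_lt _ (by norm_num)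

-- invariant of the carrying fold inside mulLimbs
lemma mulFold_val (i : Nat) : ∀ (ds out : List Nat) (c : Nat),
    dval (ds.foldl
      (fun (oc : List Nat × Nat) d => (oc.1 ++ [(oc.2 + d * i) % 100], (oc.2 + d * i) / 100))
      (out, c)).1
    + (ds.foldl
      (fun (oc : List Nat × Nat) d => (oc.1 ++ [(oc.2 + d * i) % 100], (oc.2 + d * i) / 100))
      (out, c)).2
      * 100 ^ (ds.foldl
      (fun (oc : List Nat × Nat) d => (oc.1 ++ [(oc.2 + d * i) % 100], (oc.2 + d * i) / 100))
      (out, c)).1.length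
    = dval out + (c + i * dval ds) * 100 ^ out.length := by
  intro ds
  induction ds with
  | nil => intro out c; simp [dval]
  | cons d ds ih =>
    intro out c
    rw [List.foldl_cons, ih, dval_append]
    have hcd : (c + d * i) % 100 + 100 * ((c + d * i) / 100) = c + d * i :=
      Nat.mod_add_div _ 100
    simp [List.length_append, pow_succ, dval]
    have h2 : (c + d * i) % 100 * 100 ^ out.length
          + ((c + d * i) / 100 + i * dval ds) * (100 ^ out.length * 100)
        = (c + i * (d + 100 * dval ds)) * 100 ^ out.length := by
      conv_rhs =>
        rw [show c + i * (d + 100 * dval ds) = (c + d * i) + 100 * (i * dval ds) from by ring,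
            ← hcd]
      ring
    linarith [h2]

lemma mulFold_lt (i : Nat) : ∀ (ds out : List Nat) (c : Nat), (∀ d ∈ out, d < 100) →
    ∀ x ∈ (ds.foldl
      (fun (oc : List Nat × Nat) d => (oc.1 ++ [(oc.2 + d * i) % 100], (oc.2 + d * i) / 100))
      (out, c)).1, x < 100 := by
  intro ds
  induction ds with
  | nil => intro out c hout; simpa using hout
  | cons d ds ih =>
    intro out c hout
    rw [List.foldl_cons]
    refine ih _ _ ?_
    intro x hx
    rcases List.mem_append.mp hx with h1 | h1
    · exact hout x h1
    · simp at h1; subst h1; exact Nat.mod_lt _ (by norm_num)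

lemma mulLimbs_val (ds : List Nat) (i : Nat) : dval (mulLimbs ds i) = i * dval ds := by
  unfold mulLimbs
  rw [carryExpand_val, mulFold_val]
  simp [dval]

lemma mulLimbs_lt (ds : List Nat) (i : Nat) : ∀ d ∈ mulLimbs ds i, d < 100 := by
  unfold mulLimbs
  exact carryExpand_lt _ _ (mulFold_lt i ds [] 0 (by simp))

-- the inner loops agree: B's limb list always represents i ^ (iterations done)
lemma inner_eq (i : Nat) (n : Nat) (best : Int) :
    ∃ ds : List Nat,
      ((List.range n).map Int.ofNat).foldl
          (fun (st : Int × List Nat) _ =>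
            let s : Int := (st.2.map (fun l => dsumTable.getD l 0)).sum
            (if s > st.1 then s else st.1, mulLimbs st.2 (Int.ofNat i).toNat))
          (best, [1])
        = (((List.range n).map Int.ofNat).foldl (fun maxSum j =>
            let sum := (PySem.Int.toChars ((Int.ofNat i) ^ j.toNat)).foldl
              (fun s k => s + (PySem.Int.ofChars? [k]).getD 0) 0
            if sum > maxSum then sum else maxSum) best, ds)
      ∧ dval ds = i ^ n ∧ ∀ d ∈ ds, d < 100 := by
  induction n with
  | zero => exact ⟨[1], by simp, by simp [dval], by simp⟩
  | succ n ih =>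
    obtain ⟨ds, heq, hval, h10⟩ := ih
    refine ⟨mulLimbs ds i, ?_, by rw [mulLimbs_val, hval, pow_succ]; ring,
      mulLimbs_lt ds i⟩
    rw [List.range_succ, List.map_append, List.foldl_append, List.foldl_append, heq]
    simp only [List.map_cons, List.map_nil, List.foldl_cons, List.foldl_nil]
    have hsum : (PySem.Int.toChars ((Int.ofNat i) ^ (Int.ofNat n).toNat)).foldl
        (fun s k => s + (PySem.Int.ofChars? [k]).getD 0) 0
          = (ds.map (fun l => dsumTable.getD l 0)).sum := by
      simp only [Int.ofNat_eq_natCast, Int.toNat_natCast]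
      rw [strsum_eq_digitSum _ (pow_nonneg (Int.natCast_nonneg i) _)]
      have h1 : (((i : Int)) ^ n).toNat = i ^ n := by
        rw [show ((i : Int)) ^ n = ((i ^ n : Nat) : Int) from by push_cast; ring]
        exact Int.toNat_natCast _
      rw [h1, ← hval]
      exact dval_sum ds h10
    refine Prod.ext ?_ rfl
    simp only [hsum]

-- ===== VERDICT (by name: the statement is the Claim_ definition above) =====
theorem powerfulDigitSum_spec : Claim_equal_powerfulDigitSum := by
  intro N _
  unfold Spec_powerfulDigitSum powerfulDigitSum powerfulDigitSum_alt
  by_cases hN : 0 ≤ N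
  · obtain ⟨n, rfl⟩ : ∃ n : Nat, N = (n : Int) := ⟨N.toNat, (Int.toNat_of_nonneg hN).symm⟩
    rw [show PySem.List.pyRange 0 (n : Int) = List.map Int.ofNat (List.range n) from by
      rw [PySem.List.pyRange_zero_natCast]; rfl]
    apply PySem.List.foldl_congr_mem
    intro maxSum i hi
    obtain ⟨k, _, rfl⟩ := List.mem_map.mp hi
    obtain ⟨ds, heq, -, -⟩ := inner_eq k n maxSum
    rw [heq]
  · rw [show PySem.List.pyRange 0 N = [] from by
      simp [PySem.List.pyRange]; omega]
    rfl
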